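-- pv_equiv track=rewrite | github.com/ARuhala/Old-and-unclean-school-projects | Python (Machine learning)/Ohjelmoinnin alkeet (Ohjelmointi 1)/Kierros 6/Ratsia.py | sakkolaskuri
-- ===== SOURCE A (Python) =====
-- def sakkolaskuri(lista,rajoitus):
--     rikesakkoja=0
--     sakkoja=0
--     sakkolista=[]
--     for a in lista:
--         if 8 <= a - rajoitus < 20:
--             rikesakkoja=rikesakkoja + 1
--             sakkolista.append(a)
--
--
--         elif 20 <= a - rajoitus:
--             sakkoja=sakkoja + 1
--             sakkolista.append(a)
--
--
--     return rikesakkoja, sakkoja, sakkolista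
-- ===== SOURCE B (Python) =====
-- def sakkolaskuri(lista, rajoitus):
--     sakkolista = [a for a in lista if a - rajoitus >= 8]
--     rikesakkoja = sum(1 for a in sakkolista if a - rajoitus < 20)
--     return rikesakkoja, len(sakkolista) - rikesakkoja, sakkolista
-- ===== Notes on version B (the rewrite author's own statement) =====
-- stated objective: simpler
-- what changed: Replaces the single fused loop with three-field mutable state by a filter pass building the offender list plus one counting pass over it, deriving the second count by subtraction.
import Mathlib
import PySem

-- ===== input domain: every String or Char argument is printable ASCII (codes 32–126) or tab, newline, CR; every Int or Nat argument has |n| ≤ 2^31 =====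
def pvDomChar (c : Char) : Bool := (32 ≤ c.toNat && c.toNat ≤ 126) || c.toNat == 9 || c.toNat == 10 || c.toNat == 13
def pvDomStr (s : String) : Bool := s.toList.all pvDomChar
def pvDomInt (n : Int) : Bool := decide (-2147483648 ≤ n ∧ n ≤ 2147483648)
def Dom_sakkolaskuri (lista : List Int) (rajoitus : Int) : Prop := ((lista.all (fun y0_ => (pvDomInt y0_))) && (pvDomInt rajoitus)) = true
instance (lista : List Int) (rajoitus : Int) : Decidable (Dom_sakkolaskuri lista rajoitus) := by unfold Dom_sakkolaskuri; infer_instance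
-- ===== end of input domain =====

-- B replaces A's single fused loop (three mutable accumulators) by a filter pass building
-- the offender list plus one counting pass over it, deriving the second count by subtraction (simpler).


-- ===== PORT A =====
-- literal transliteration of A's single loop with state (rikesakkoja, sakkoja, sakkolista)
def sakkolaskuri (lista : List Int) (rajoitus : Int) : Int × Int × List Int :=
  lista.foldl (fun (st : Int × Int × List Int) a =>
    let (rikesakkoja, sakkoja, sakkolista) := st
    if 8 ≤ a - rajoitus ∧ a - rajoitus < 20 then
      (rikesakkoja + 1, sakkoja, sakkolista ++ [a])
    else if 20 ≤ a - rajoitus then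
      (rikesakkoja, sakkoja + 1, sakkolista ++ [a])
    else
      (rikesakkoja, sakkoja, sakkolista)) (0, 0, [])

-- ===== PORT B =====
-- transliteration of Source B: filter pass, counting pass, subtraction
def sakkolaskuri_alt (lista : List Int) (rajoitus : Int) : Int × Int × List Int :=
  let sakkolista := lista.filter (fun a => decide (a - rajoitus ≥ 8))
  let rikesakkoja : Int := (sakkolista.countP (fun a => decide (a - rajoitus < 20)) : Int)
  (rikesakkoja, (sakkolista.length : Int) - rikesakkoja, sakkolista)

-- ===== PRECONDITION & SPEC =====
def Spec_sakkolaskuri (lista : List Int) (rajoitus : Int) (out : Int × Int × List Int) : Prop := out = sakkolaskuri_alt lista rajoitus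
instance (lista : List Int) (rajoitus : Int) (out : Int × Int × List Int) : Decidable (Spec_sakkolaskuri lista rajoitus out) := by unfold Spec_sakkolaskuri; infer_instance

-- ===== CLAIM (what is proved, stated in full; the proofs are below) =====
def Claim_equal_sakkolaskuri : Prop := ∀ (lista : List Int) (rajoitus : Int), Dom_sakkolaskuri lista rajoitus → Spec_sakkolaskuri lista rajoitus (sakkolaskuri lista rajoitus)

-- ===== LEMMAS AND PROOFS =====

-- loop invariant: A's fold from an arbitrary starting state
theorem sakkolaskuri_fold_inv (rajoitus : Int) (lista : List Int)
    (r s : Int) (l : List Int) :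
    lista.foldl (fun (st : Int × Int × List Int) a =>
      let (rikesakkoja, sakkoja, sakkolista) := st
      if 8 ≤ a - rajoitus ∧ a - rajoitus < 20 then
        (rikesakkoja + 1, sakkoja, sakkolista ++ [a])
      else if 20 ≤ a - rajoitus then
        (rikesakkoja, sakkoja + 1, sakkolista ++ [a])
      else
        (rikesakkoja, sakkoja, sakkolista)) (r, s, l) =
    (r + ((lista.filter (fun a => decide (a - rajoitus ≥ 8))).countP
            (fun a => decide (a - rajoitus < 20)) : Int),
     s + ((lista.filter (fun a => decide (a - rajoitus ≥ 8))).length : Int)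
       - ((lista.filter (fun a => decide (a - rajoitus ≥ 8))).countP
            (fun a => decide (a - rajoitus < 20)) : Int),
     l ++ lista.filter (fun a => decide (a - rajoitus ≥ 8))) := by
  induction lista generalizing r s l with
  | nil => simp
  | cons a t ih =>
    simp only [List.foldl_cons, List.filter_cons]
    by_cases h1 : 8 ≤ a - rajoitus ∧ a - rajoitus < 20
    · rw [if_pos h1, ih]
      have : decide (a - rajoitus ≥ 8) = true := by simp [h1.1]
      simp [this, h1.2]
      omega
    · rw [if_neg h1]
      by_cases h2 : 20 ≤ a - rajoitus
      · rw [if_pos h2, ih]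
        have hge : decide (a - rajoitus ≥ 8) = true := by simp; omega
        have hlt : ¬ (a - rajoitus < 20) := by omega
        simp [hge, hlt]
        omega
      · rw [if_neg h2, ih]
        have hge : decide (a - rajoitus ≥ 8) = false := by simp; omega
        simp [hge]

-- ===== VERDICT (by name: the statement is the Claim_ definition above) =====
theorem sakkolaskuri_spec : Claim_equal_sakkolaskuri := by
  intro lista rajoitus _
  unfold Spec_sakkolaskuri sakkolaskuri sakkolaskuri_alt
  rw [sakkolaskuri_fold_inv]
  simp
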